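-- pv_equiv track=rewrite | github.com/baraaorabi/freddie-sc | py/freddie_segment.py | non_desert
-- ===== SOURCE A (Python) =====
-- from itertools import groupby
--
-- def non_desert(y, jump=10):
--     l = list()
--     for k, group in groupby(enumerate(y), lambda x: x[1] > 0):
--         if not k:
--             continue
--         group = list(group)
--         f_idx = group[0][0]
--         l_idx = group[-1][0]
--         if len(l) == 0:
--             l.append([f_idx, l_idx])
--         elif l_idx - l[-1][-1] < jump:
--             l[-1][-1] = l_idx
--         else:
--             l.append([f_idx, l_idx])
--     return l
-- ===== SOURCE B (Python) =====
-- def non_desert(y, jump=10):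
--     # Boundary detection by neighbour comparison: an index is a run start iff it is
--     # positive and its left neighbour is not; a run last iff positive and its right
--     # neighbour is not.
--     pos = [v > 0 for v in y]
--     starts = [i for i, (p, c) in enumerate(zip([False] + pos, pos)) if c and not p]
--     lasts = [i for i, (c, nx) in enumerate(zip(pos, pos[1:] + [False])) if c and not nx]
--     # Merge by cut detection over consecutive run-last gaps: a new block begins at
--     # run k exactly when lasts[k] - lasts[k-1] >= jump (the block's running end is
--     # always the previous run's last index, so this pairwise test is the merge rule).
--     out = []
--     if starts:
--         bstart = starts[0]
--         for l_prev, s, l in zip(lasts, starts[1:], lasts[1:]):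
--             if l - l_prev >= jump:
--                 out.append([bstart, l_prev])
--                 bstart = s
--         out.append([bstart, lasts[-1]])
--     return out
-- ===== Notes on version B (the rewrite author's own statement) =====
-- stated objective: alternative
-- what changed: Replaced the groupby-with-inline-merge loop by neighbour-comparison boundary detection (run starts/lasts as zip-filter comprehensions) followed by a pairwise cut scan over consecutive run-last gaps, using the invariant that the growing block's end always equals the previous run's last index; the result list is never mutated.
import Mathlib
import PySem

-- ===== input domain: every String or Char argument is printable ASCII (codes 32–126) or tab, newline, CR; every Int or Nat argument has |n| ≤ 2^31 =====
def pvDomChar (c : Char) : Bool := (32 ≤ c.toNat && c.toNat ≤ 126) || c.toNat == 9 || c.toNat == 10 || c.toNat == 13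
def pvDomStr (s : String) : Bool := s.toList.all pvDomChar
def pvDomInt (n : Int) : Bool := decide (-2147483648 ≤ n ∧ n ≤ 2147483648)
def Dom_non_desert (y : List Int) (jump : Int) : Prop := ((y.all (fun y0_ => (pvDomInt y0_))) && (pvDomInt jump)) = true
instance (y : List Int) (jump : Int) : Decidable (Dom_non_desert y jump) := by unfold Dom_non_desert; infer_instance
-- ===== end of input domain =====

-- B replaces A's groupby-with-inline-merge loop by neighbour-comparison boundary
-- detection (run starts/lasts as zip-filter comprehensions) plus a pairwise cut scan
-- over consecutive run-last gaps; objective: alternative decomposition. The RETURN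
-- value is what is proved equal (neither version mutates its arguments).

-- ===== PORT A =====
-- itertools.groupby(·, lambda x: x[1] > 0) on the enumerated list: consecutive elements
-- with the same key collected into groups, in order.
def pvGroupby : List (Int × Int) → List (Bool × List (Int × Int))
  | [] => []
  | x :: xs =>
    match pvGroupby xs with
    | [] => [(decide (x.2 > 0), [x])]
    | (k, g) :: rest =>
      if decide (x.2 > 0) = k then (k, x :: g) :: rest
      else (decide (x.2 > 0), [x]) :: (k, g) :: rest

-- the body of A's for-loop over groups (l is the accumulated list of ranges)
def pvAStep (jump : Int) (l : List (List Int)) (kg : Bool × List (Int × Int)) : List (List Int) :=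
  if !kg.1 then l  -- `if not k: continue`
  else
    let f_idx := (kg.2.headD (0, 0)).1     -- group[0][0]  (groups are never empty)
    let l_idx := (kg.2.getLastD (0, 0)).1  -- group[-1][0]
    if l.length = 0 then l ++ [[f_idx, l_idx]]
    else if l_idx - (l.getLastD []).getLastD 0 < jump then
      l.dropLast ++ [(l.getLastD []).dropLast ++ [l_idx]]  -- l[-1][-1] = l_idx
    else l ++ [[f_idx, l_idx]]

def non_desert (y : List Int) (jump : Int) : List (List Int) :=
  (pvGroupby (PySem.List.enumerate y)).foldl (pvAStep jump) []

-- ===== PORT B =====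
-- body of B's for-loop over zip(lasts, starts[1:], lasts[1:]) (a Python 3-tuple is the
-- nested pair (l_prev, (s, l))); state = (bstart, out)
def pvCutStep (jump : Int) (st : Int × List (List Int)) (t : Int × Int × Int) :
    Int × List (List Int) :=
  if t.2.2 - t.1 ≥ jump then (t.2.1, st.2 ++ [[st.1, t.1]]) else st

def non_desert_alt (y : List Int) (jump : Int) : List (List Int) :=
  let pos := y.map (fun v => decide (v > 0))
  -- [i for i, (p, c) in enumerate(zip([False] + pos, pos)) if c and not p]
  let starts := ((PySem.List.enumerate (List.zip (false :: pos) pos)).filter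
      (fun x => x.2.2 && !x.2.1)).map (fun x => x.1)
  -- [i for i, (c, nx) in enumerate(zip(pos, pos[1:] + [False])) if c and not nx]
  let lasts := ((PySem.List.enumerate (List.zip pos
      (PySem.List.slice pos (some 1) none ++ [false]))).filter
      (fun x => x.2.1 && !x.2.2)).map (fun x => x.1)
  if starts = [] then []          -- `if starts:` — out stays []
  else
    let fin := (List.zip lasts (List.zip (PySem.List.slice starts (some 1) none)
        (PySem.List.slice lasts (some 1) none))).foldl (pvCutStep jump) (starts.headD 0, [])
    -- starts[0] and lasts[-1]: both lists are nonempty here, defaults are never used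
    fin.2 ++ [[fin.1, (PySem.List.pyGet? lasts (-1)).getD 0]]

-- ===== PRECONDITION & SPEC =====
def Spec_non_desert (y : List Int) (jump : Int) (out : List (List Int)) : Prop := out = non_desert_alt y jump
instance (y : List Int) (jump : Int) (out : List (List Int)) : Decidable (Spec_non_desert y jump out) := by unfold Spec_non_desert; infer_instance

-- ===== CLAIM (what is proved, stated in full; the proofs are below) =====
def Claim_equal_non_desert : Prop := ∀ (y : List Int) (jump : Int), Dom_non_desert y jump → Spec_non_desert y jump (non_desert y jump)

-- ===== LEMMAS AND PROOFS =====

-- canonical (first, last) run list of y, indices starting at i, op = start of the open run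
def cRuns (i : Int) (op : Option Int) : List Int → List (Int × Int)
  | [] => match op with | some f => [(f, i - 1)] | none => []
  | v :: ys =>
    if v > 0 then cRuns (i + 1) (some (op.getD i)) ys
    else match op with
      | some f => (f, i - 1) :: cRuns (i + 1) none ys
      | none => cRuns (i + 1) none ys

-- the (first, last) index pairs of the positive groups, in order
def pvExtract : List (Bool × List (Int × Int)) → List (Int × Int)
  | [] => []
  | (k, g) :: rest =>
    if k then ((g.headD (0, 0)).1, (g.getLastD (0, 0)).1) :: pvExtract rest
    else pvExtract rest

-- pvExtract of a groupby preceded by an open run (s, l)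
def pvExtractCons (s l : Int) : List (Bool × List (Int × Int)) → List (Int × Int)
  | (true, g) :: rest => (s, (g.getLastD (0, 0)).1) :: pvExtract rest
  | gs => (s, l) :: pvExtract gs

-- merge step extracted from pvAStep (acts on one (first,last) pair)
def pvMergeStep (jump : Int) (res : List (List Int)) (fl : Int × Int) : List (List Int) :=
  if res.length = 0 then res ++ [[fl.1, fl.2]]
  else if fl.2 - (res.getLastD []).getLastD 0 < jump then
    res.dropLast ++ [(res.getLastD []).dropLast ++ [fl.2]]
  else res ++ [[fl.1, fl.2]]

-- recursive form of the merge: current block start b, previous run last lp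
def pvMergeRec (jump : Int) : Int → Int → List (Int × Int) → List (List Int)
  | b, lp, [] => [[b, lp]]
  | b, lp, (f, l) :: rs =>
    if l - lp < jump then pvMergeRec jump b l rs else [b, lp] :: pvMergeRec jump f l rs

theorem pvAStep_eq (jump : Int) (l : List (List Int)) (k : Bool) (g : List (Int × Int)) :
    pvAStep jump l (k, g) =
      if k then pvMergeStep jump l ((g.headD (0, 0)).1, (g.getLastD (0, 0)).1) else l := by
  cases k <;> simp [pvAStep, pvMergeStep]

theorem foldl_aStep_eq (jump : Int) :
    ∀ (gs : List (Bool × List (Int × Int))) (acc : List (List Int)),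
      gs.foldl (pvAStep jump) acc = (pvExtract gs).foldl (pvMergeStep jump) acc := by
  intro gs
  induction gs with
  | nil => intro acc; rfl
  | cons p rest ih =>
    intro acc
    obtain ⟨k, g⟩ := p
    cases k <;> simp [List.foldl, pvAStep_eq, pvExtract, ih]

theorem pvGroupby_ne_nil : ∀ (xs : List (Int × Int)), ∀ p ∈ pvGroupby xs, p.2 ≠ [] := by
  intro xs
  induction xs with
  | nil => simp [pvGroupby]
  | cons x xs ih =>
    intro p hp
    simp only [pvGroupby] at hp
    cases hg : pvGroupby xs with
    | nil => rw [hg] at hp; simp at hp; simp [hp]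
    | cons q rest =>
      rw [hg] at hp
      obtain ⟨k, g⟩ := q
      by_cases h : decide (x.2 > 0) = k
      · simp [h] at hp
        rcases hp with hp | hp
        · simp [hp]
        · exact ih _ (hg ▸ (by simp [hp]))
      · simp [h] at hp
        rcases hp with hp | hp | hp
        · simp [hp]
        · exact ih _ (hg ▸ (by simp [hp]))
        · exact ih _ (hg ▸ (by simp [hp]))

theorem getLast?_getD_cons_ne {α : Type} (x : α) (g : List α) (h : g ≠ []) (d : α) :
    (x :: g).getLast?.getD d = g.getLast?.getD d := by
  cases g with
  | nil => exact absurd rfl h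
  | cons b l => rw [List.getLast?_cons_cons]

-- A-side characterisation: extract ∘ groupby ∘ enumerate = cRuns
theorem groupby_cRuns :
    ∀ (ys : List Int) (i : Int),
      pvExtract (pvGroupby (PySem.List.enumerate ys i)) = cRuns i none ys ∧
      ∀ f, pvExtractCons f (i - 1) (pvGroupby (PySem.List.enumerate ys i)) = cRuns i (some f) ys := by
  intro ys
  induction ys with
  | nil =>
    intro i
    constructor
    · simp [PySem.List.enumerate_nil, pvGroupby, pvExtract, cRuns]
    · intro f; simp [PySem.List.enumerate_nil, pvGroupby, pvExtractCons, pvExtract, cRuns]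
  | cons v ys ih =>
    intro i
    have ihN := (ih (i + 1)).1
    have ihS := (ih (i + 1)).2
    rw [PySem.List.enumerate_cons]
    by_cases hv : v > 0
    · -- positive head
      constructor
      · show pvExtract (pvGroupby ((i, v) :: PySem.List.enumerate ys (i + 1))) = _
        rw [show cRuns i none (v :: ys) = cRuns (i + 1) (some i) ys by simp [cRuns, hv]]
        rw [← ihS i]
        simp only [show i + 1 - 1 = i by ring]
        cases hg : pvGroupby (PySem.List.enumerate ys (i + 1)) with
        | nil => simp [pvGroupby, hg, hv, pvExtract, pvExtractCons]
        | cons q rest =>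
          obtain ⟨k, g⟩ := q
          have hgne : g ≠ [] := pvGroupby_ne_nil _ (k, g) (by rw [hg]; exact List.mem_cons_self)
          cases k with
          | true =>
            simp only [pvGroupby, hg, hv, decide_true]
            simp [pvExtract, pvExtractCons, getLast?_getD_cons_ne ((i : Int), v) g hgne]
          | false =>
            simp [pvGroupby, hg, hv, pvExtract, pvExtractCons]
      · intro f
        show pvExtractCons f (i - 1) (pvGroupby ((i, v) :: PySem.List.enumerate ys (i + 1))) = _
        rw [show cRuns i (some f) (v :: ys) = cRuns (i + 1) (some f) ys by simp [cRuns, hv]]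
        rw [← ihS f]
        simp only [show i + 1 - 1 = i by ring]
        cases hg : pvGroupby (PySem.List.enumerate ys (i + 1)) with
        | nil => simp [pvGroupby, hg, hv, pvExtract, pvExtractCons]
        | cons q rest =>
          obtain ⟨k, g⟩ := q
          have hgne : g ≠ [] := pvGroupby_ne_nil _ (k, g) (by rw [hg]; exact List.mem_cons_self)
          cases k with
          | true =>
            simp only [pvGroupby, hg, hv, decide_true]
            simp [pvExtract, pvExtractCons, getLast?_getD_cons_ne ((i : Int), v) g hgne]
          | false =>
            simp [pvGroupby, hg, hv, pvExtract, pvExtractCons]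
    · -- nonpositive head
      constructor
      · show pvExtract (pvGroupby ((i, v) :: PySem.List.enumerate ys (i + 1))) = _
        rw [show cRuns i none (v :: ys) = cRuns (i + 1) none ys by simp [cRuns, hv]]
        rw [← ihN]
        cases hg : pvGroupby (PySem.List.enumerate ys (i + 1)) with
        | nil => simp [pvGroupby, hg, hv, pvExtract]
        | cons q rest =>
          obtain ⟨k, g⟩ := q
          cases k with
          | true => simp [pvGroupby, hg, hv, pvExtract]
          | false => simp [pvGroupby, hg, hv, pvExtract]
      · intro f
        show pvExtractCons f (i - 1) (pvGroupby ((i, v) :: PySem.List.enumerate ys (i + 1))) = _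
        rw [show cRuns i (some f) (v :: ys) = (f, i - 1) :: cRuns (i + 1) none ys by
          simp [cRuns, hv]]
        rw [← ihN]
        cases hg : pvGroupby (PySem.List.enumerate ys (i + 1)) with
        | nil => simp [pvGroupby, hg, hv, pvExtract, pvExtractCons]
        | cons q rest =>
          obtain ⟨k, g⟩ := q
          cases k with
          | true => simp [pvGroupby, hg, hv, pvExtract, pvExtractCons]
          | false => simp [pvGroupby, hg, hv, pvExtract, pvExtractCons]

-- zip of the two projections reassembles a pair list
theorem zip_fst_snd {A B : Type} : forall (l : List (A × B)),
    List.zip (l.map Prod.fst) (l.map Prod.snd) = l := by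
  intro l
  induction l with
  | nil => rfl
  | cons p rs ih => simp [ih]

-- B-side: the starts comprehension computes the run starts
theorem starts_cRuns :
    forall (ys : List Int) (i : Int),
      ((((PySem.List.enumerate (List.zip (false :: ys.map (fun v => decide (v > 0)))
          (ys.map (fun v => decide (v > 0)))) i).filter
          (fun x => x.2.2 && !x.2.1)).map (fun x => x.1)) =
        (cRuns i none ys).map Prod.fst) ∧
      (forall f, f :: (((PySem.List.enumerate (List.zip (true :: ys.map (fun v => decide (v > 0)))
          (ys.map (fun v => decide (v > 0)))) i).filter
          (fun x => x.2.2 && !x.2.1)).map (fun x => x.1)) =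
        (cRuns i (some f) ys).map Prod.fst) := by
  intro ys
  induction ys with
  | nil =>
    intro i
    refine ⟨by simp [PySem.List.enumerate_nil, cRuns], fun f => by
      simp [PySem.List.enumerate_nil, cRuns]⟩
  | cons v ys ih =>
    intro i
    have ihN := (ih (i + 1)).1
    have ihS := (ih (i + 1)).2
    by_cases hv : v > 0
    · constructor
      · rw [show cRuns i none (v :: ys) = cRuns (i + 1) (some i) ys by simp [cRuns, hv]]
        rw [← ihS i]
        simp [PySem.List.enumerate_cons, hv]
      · intro f
        rw [show cRuns i (some f) (v :: ys) = cRuns (i + 1) (some f) ys by simp [cRuns, hv]]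
        rw [← ihS f]
        simp [PySem.List.enumerate_cons, hv]
    · constructor
      · rw [show cRuns i none (v :: ys) = cRuns (i + 1) none ys by simp [cRuns, hv]]
        rw [← ihN]
        simp [PySem.List.enumerate_cons, hv]
      · intro f
        rw [show cRuns i (some f) (v :: ys) = (f, i - 1) :: cRuns (i + 1) none ys by
          simp [cRuns, hv]]
        simp only [List.map_cons]
        rw [← ihN]
        simp [PySem.List.enumerate_cons, hv]

-- head positivity of a list (false for [])
def ppHead : List Int → Bool
  | [] => false
  | v :: _ => decide (v > 0)

-- the lasts comprehension, one cons step
theorem lasts_expr_cons (v : Int) (ys : List Int) (i : Int) :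
    (((PySem.List.enumerate (List.zip ((v :: ys).map (fun v => decide (v > 0)))
        (((v :: ys).map (fun v => decide (v > 0))).tail ++ [false])) i).filter
        (fun x => x.2.1 && !x.2.2)).map (fun x => x.1)) =
      (if decide (v > 0) && !(ppHead ys) then [i] else []) ++
      (((PySem.List.enumerate (List.zip (ys.map (fun v => decide (v > 0)))
        ((ys.map (fun v => decide (v > 0))).tail ++ [false])) (i + 1)).filter
        (fun x => x.2.1 && !x.2.2)).map (fun x => x.1)) := by
  cases ys with
  | nil => by_cases hv : v > 0 <;> simp [PySem.List.enumerate_cons, ppHead, hv]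
  | cons w ys' =>
    by_cases hv : v > 0 <;> by_cases hw : w > 0 <;>
      simp [PySem.List.enumerate_cons, ppHead, hv, hw]

-- B-side: the lasts comprehension computes the run lasts
theorem lasts_cRuns :
    forall (ys : List Int) (i : Int),
      ((((PySem.List.enumerate (List.zip (ys.map (fun v => decide (v > 0)))
          ((ys.map (fun v => decide (v > 0))).tail ++ [false])) i).filter
          (fun x => x.2.1 && !x.2.2)).map (fun x => x.1)) =
        (cRuns i none ys).map Prod.snd) ∧
      (forall f, (cRuns i (some f) ys).map Prod.snd =
        (if ppHead ys then ([] : List Int) else [i - 1]) ++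
          (((PySem.List.enumerate (List.zip (ys.map (fun v => decide (v > 0)))
            ((ys.map (fun v => decide (v > 0))).tail ++ [false])) i).filter
            (fun x => x.2.1 && !x.2.2)).map (fun x => x.1))) := by
  intro ys
  induction ys with
  | nil =>
    intro i
    refine ⟨by simp [PySem.List.enumerate_nil, cRuns], fun f => by
      simp [PySem.List.enumerate_nil, cRuns, ppHead]⟩
  | cons v ys ih =>
    intro i
    have ihN := (ih (i + 1)).1
    have ihS := (ih (i + 1)).2
    by_cases hv : v > 0
    · constructor
      · rw [lasts_expr_cons,
          show cRuns i none (v :: ys) = cRuns (i + 1) (some i) ys by simp [cRuns, hv]]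
        rw [ihS i]
        cases hpp : ppHead ys <;> simp [hpp, hv, add_sub_cancel_right]
      · intro f
        rw [show cRuns i (some f) (v :: ys) = cRuns (i + 1) (some f) ys by simp [cRuns, hv],
          ihS f, lasts_expr_cons,
          show ppHead (v :: ys) = true by simp [ppHead, hv]]
        cases hpp : ppHead ys <;> simp [hpp, hv, add_sub_cancel_right]
    · constructor
      · rw [lasts_expr_cons,
          show cRuns i none (v :: ys) = cRuns (i + 1) none ys by simp [cRuns, hv]]
        rw [ihN]
        simp [hv]
      · intro f
        rw [show cRuns i (some f) (v :: ys) = (f, i - 1) :: cRuns (i + 1) none ys by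
            simp [cRuns, hv],
          lasts_expr_cons, show ppHead (v :: ys) = false by simp [ppHead, hv]]
        simp only [List.map_cons]
        rw [← ihN]
        simp [hv]

-- A-side merge fold equals the recursive merge
theorem mergeRec_A (jump : Int) :
    forall (rs : List (Int × Int)) (b lp : Int) (acc : List (List Int)),
      List.foldl (pvMergeStep jump) (acc ++ [[b, lp]]) rs = acc ++ pvMergeRec jump b lp rs := by
  intro rs
  induction rs with
  | nil => intro b lp acc; simp [pvMergeRec]
  | cons r rs ih =>
    intro b lp acc
    obtain ⟨f, l⟩ := r
    have hlast : (acc ++ [[b, lp]]).getLastD ([] : List Int) = [b, lp] := by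
      simp [List.getLastD_eq_getLast?]
    by_cases hc : l - lp < jump
    · have hstep : pvMergeStep jump (acc ++ [[b, lp]]) (f, l) = acc ++ [[b, l]] := by
        simp [pvMergeStep, hlast, hc, List.getLastD_cons]
      rw [List.foldl_cons, hstep, ih, show pvMergeRec jump b lp ((f, l) :: rs) =
        pvMergeRec jump b l rs by simp [pvMergeRec, hc]]
    · have hstep : pvMergeStep jump (acc ++ [[b, lp]]) (f, l) =
          (acc ++ [[b, lp]]) ++ [[f, l]] := by
        simp [pvMergeStep, hlast, hc, List.getLastD_cons]
      rw [List.foldl_cons, hstep, ih, show pvMergeRec jump b lp ((f, l) :: rs) =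
        [b, lp] :: pvMergeRec jump f l rs by simp [pvMergeRec, hc]]
      simp

-- B-side cut fold equals the recursive merge
theorem mergeRec_B (jump : Int) :
    forall (rs : List (Int × Int)) (b lp : Int) (out : List (List Int)),
      (List.foldl (pvCutStep jump) (b, out) (List.zip (lp :: rs.map Prod.snd) rs)).2 ++
        [[(List.foldl (pvCutStep jump) (b, out) (List.zip (lp :: rs.map Prod.snd) rs)).1,
          (rs.map Prod.snd).getLastD lp]] = out ++ pvMergeRec jump b lp rs := by
  intro rs
  induction rs with
  | nil => intro b lp out; simp [pvMergeRec]
  | cons r rs ih =>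
    intro b lp out
    obtain ⟨f, l⟩ := r
    have hzip : List.zip (lp :: ((f, l) :: rs).map Prod.snd) ((f, l) :: rs) =
        (lp, (f, l)) :: List.zip (l :: rs.map Prod.snd) rs := by
      simp [List.zip]
    rw [hzip]
    by_cases hc : l - lp < jump
    · have hstep : pvCutStep jump (b, out) (lp, (f, l)) = (b, out) := by
        simp [pvCutStep]; omega
      rw [List.foldl_cons, hstep,
        show pvMergeRec jump b lp ((f, l) :: rs) = pvMergeRec jump b l rs by
          simp [pvMergeRec, hc],
        show (((f, l) :: rs).map Prod.snd).getLastD lp = (rs.map Prod.snd).getLastD l by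
          rw [List.map_cons, List.getLastD_cons]]
      exact ih b l out
    · have hstep : pvCutStep jump (b, out) (lp, (f, l)) = (f, out ++ [[b, lp]]) := by
        simp [pvCutStep]; omega
      rw [List.foldl_cons, hstep,
        show pvMergeRec jump b lp ((f, l) :: rs) = [b, lp] :: pvMergeRec jump f l rs by
          simp [pvMergeRec, hc],
        show (((f, l) :: rs).map Prod.snd).getLastD lp = (rs.map Prod.snd).getLastD l by
          rw [List.map_cons, List.getLastD_cons]]
      rw [ih f l (out ++ [[b, lp]])]
      simp

-- ===== VERDICT (by name: the statement is the Claim_ definition above) =====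
theorem non_desert_spec : Claim_equal_non_desert := by
  intro y jump _
  unfold Spec_non_desert non_desert non_desert_alt
  rw [foldl_aStep_eq, (groupby_cRuns y 0).1]
  have hS := (starts_cRuns y 0).1
  have hL := (lasts_cRuns y 0).1
  simp only [PySem.List.slice_from_one]
  cases hR : cRuns 0 none y with
  | nil =>
    rw [hR] at hS hL
    simp [hS]
  | cons r rs =>
    obtain ⟨f0, l0⟩ := r
    rw [hR] at hS hL
    simp only [hS, hL, List.map_cons]
    have hne : (f0 :: rs.map Prod.fst) ≠ [] := by simp
    rw [if_neg hne]
    simp only [List.tail_cons, zip_fst_snd, List.headD_cons, PySem.List.pyGet?_neg_one]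
    have hlast : ((l0 :: rs.map Prod.snd).getLast?).getD 0 = (rs.map Prod.snd).getLastD l0 := by
      simp [← List.getLastD_eq_getLast?, List.getLastD_cons]
    rw [hlast]
    rw [List.foldl_cons, show pvMergeStep jump [] (f0, l0) = [] ++ [[f0, l0]] by
      simp [pvMergeStep]]
    rw [mergeRec_A jump rs f0 l0 []]
    rw [mergeRec_B jump rs f0 l0 []]
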